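-- pv_equiv track=rewrite | github.com/FahrenheitResearch/open-dealiasing-algorithms | open_dealias/volume3d.py | _sweep_order_from_seed
-- ===== SOURCE A (Python) =====
-- def _sweep_order_from_seed(seed: int, n_sweeps: int) -> list[int]:
--     order = [seed]
--     step = 1
--     while seed - step >= 0 or seed + step < n_sweeps:
--         if seed + step < n_sweeps:
--             order.append(seed + step)
--         if seed - step >= 0:
--             order.append(seed - step)
--         step += 1
--     return order
-- ===== SOURCE B (Python) =====
-- def _sweep_order_from_seed(seed: int, n_sweeps: int) -> list[int]:
--     # All other candidate indices, generated in two staged ranges, then ordered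
--     # by distance from the seed (ties: the larger index first) with a sort.
--     candidates = list(range(0, seed)) + list(range(seed + 1, n_sweeps))
--     return [seed] + sorted(candidates, key=lambda i: 2 * abs(i - seed) + (1 if i < seed else 0))
-- ===== Notes on version B (the rewrite author's own statement) =====
-- stated objective: alternative
-- what changed: Replaces A's single step-indexed while-loop that interleaves indices outward with a staged generate-then-sort: build all candidate indices as two plain ranges, then order them with one key-based sort (key = 2*abs(i-seed) + (1 if i<seed else 0), i.e. distance to seed with larger index first on ties), prepending seed unconditionally.
import Mathlib
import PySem

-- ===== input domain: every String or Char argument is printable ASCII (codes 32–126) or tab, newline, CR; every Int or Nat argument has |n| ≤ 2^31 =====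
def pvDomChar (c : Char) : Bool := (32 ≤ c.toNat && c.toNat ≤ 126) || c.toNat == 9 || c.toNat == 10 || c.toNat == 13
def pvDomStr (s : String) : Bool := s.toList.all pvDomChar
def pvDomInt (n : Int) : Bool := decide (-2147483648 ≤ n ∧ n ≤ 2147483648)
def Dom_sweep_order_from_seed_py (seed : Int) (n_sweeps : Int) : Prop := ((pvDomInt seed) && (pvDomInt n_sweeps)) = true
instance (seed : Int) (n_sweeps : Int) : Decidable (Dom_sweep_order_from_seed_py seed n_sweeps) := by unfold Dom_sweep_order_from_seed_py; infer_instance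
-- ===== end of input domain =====

-- B replaces A's step-indexed interleaving while-loop by two staged range builds plus a single
-- key-based sort (distance to seed, larger index first on ties); objective: alternative decomposition.

-- ===== PORT A =====
-- the while-loop of A: state (step, order); loops while seed-step >= 0 or seed+step < n
def sweepLoopA (seed n : Int) (step : Int) (order : List Int) : List Int :=
  if h : seed - step ≥ 0 ∨ seed + step < n then
    let order₁ := if seed + step < n then order ++ [seed + step] else order
    let order₂ := if seed - step ≥ 0 then order₁ ++ [seed - step] else order₁
    sweepLoopA seed n (step + 1) order₂
  else order
termination_by (max seed (n - seed - 1) + 1 - step).toNat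
decreasing_by omega

def sweep_order_from_seed_py (seed : Int) (n_sweeps : Int) : List Int :=
  sweepLoopA seed n_sweeps 1 [seed]

-- ===== PORT B =====
-- candidates = list(range(0, seed)) + list(range(seed+1, n_sweeps));
-- [seed] + sorted(candidates, key=lambda i: 2*abs(i-seed) + (1 if i < seed else 0))
def sweepKeyB (seed : Int) (i : Int) : Int :=
  2 * |i - seed| + (if i < seed then 1 else 0)

def sweep_order_from_seed_py_alt (seed : Int) (n_sweeps : Int) : List Int :=
  seed :: PySem.List.sorted
    (PySem.List.pyRange 0 seed 1 ++ PySem.List.pyRange (seed + 1) n_sweeps 1)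
    (sweepKeyB seed) false

-- ===== PRECONDITION & SPEC =====
def Spec_sweep_order_from_seed_py (seed : Int) (n_sweeps : Int) (out : List Int) : Prop := out = sweep_order_from_seed_py_alt seed n_sweeps
instance (seed : Int) (n_sweeps : Int) (out : List Int) : Decidable (Spec_sweep_order_from_seed_py seed n_sweeps out) := by unfold Spec_sweep_order_from_seed_py; infer_instance

-- ===== CLAIM (what is proved, stated in full; the proofs are below) =====
def Claim_equal_sweep_order_from_seed_py : Prop := ∀ (seed : Int) (n_sweeps : Int), Dom_sweep_order_from_seed_py seed n_sweeps → Spec_sweep_order_from_seed_py seed n_sweeps (sweep_order_from_seed_py seed n_sweeps)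

-- ===== LEMMAS AND PROOFS =====

-- proof-only helper: round-robin merge of two lists (the shape A's loop produces)
def zipMerge : List Int → List Int → List Int
  | [], [] => []
  | [], l :: ls => l :: zipMerge [] ls
  | r :: rs, [] => r :: zipMerge rs []
  | r :: rs, l :: ls => r :: l :: zipMerge rs ls

lemma zipMerge_perm : ∀ rs ls : List Int, (zipMerge rs ls).Perm (rs ++ ls)
  | [], [] => by simp [zipMerge]
  | [], l :: ls => by simpa [zipMerge] using (zipMerge_perm [] ls).cons l
  | r :: rs, [] => by simpa [zipMerge] using (zipMerge_perm rs []).cons r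
  | r :: rs, l :: ls => by
    have h := (zipMerge_perm rs ls).cons l
    have h2 : (l :: zipMerge rs ls).Perm (rs ++ l :: ls) :=
      h.trans (List.perm_middle.symm)
    simpa [zipMerge] using h2.cons r

lemma mem_zipMerge {x : Int} {rs ls : List Int} (h : x ∈ zipMerge rs ls) : x ∈ rs ∨ x ∈ ls := by
  have := (zipMerge_perm rs ls).mem_iff.mp h
  simpa using this

-- A's loop at counter `step` produces `order` followed by the zip-merge of the two remaining ranges
lemma sweepLoopA_eq_merge (seed n : Int) :
    ∀ step order, sweepLoopA seed n step order =
      order ++ zipMerge (PySem.List.pyRange (seed + step) n 1)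
                        (PySem.List.pyRange (seed - step) (-1) (-1)) := by
  intro step order
  fun_induction sweepLoopA seed n step order with
  | case1 step order h o1 o2 ih =>
    simp only [o1, o2] at ih ⊢
    have e1 : seed + (step + 1) = seed + step + 1 := by ring
    have e2 : seed - (step + 1) = seed - step - 1 := by ring
    rw [ih, e1, e2]
    by_cases hr : seed + step < n <;> by_cases hl : seed - step ≥ 0
    · rw [dif_pos hl, dif_pos hr,
          PySem.List.pyRange_one_cons (a := seed + step) (b := n) hr,
          PySem.List.pyRange_neg_one_cons (a := seed - step) (b := -1) (by omega)]
      simp [zipMerge]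
    · rw [dif_neg hl, dif_pos hr,
          PySem.List.pyRange_one_cons (a := seed + step) (b := n) hr,
          PySem.List.pyRange_neg_one_eq_nil (a := seed - step) (b := -1) (by omega),
          PySem.List.pyRange_neg_one_eq_nil (a := seed - step - 1) (b := -1) (by omega)]
      simp [zipMerge]
    · rw [dif_pos hl, dif_neg hr,
          PySem.List.pyRange_one_eq_nil (a := seed + step) (b := n) (by omega),
          PySem.List.pyRange_one_eq_nil (a := seed + step + 1) (b := n) (by omega),
          PySem.List.pyRange_neg_one_cons (a := seed - step) (b := -1) (by omega)]
      simp [zipMerge]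
    · omega
  | case2 step order h =>
    rw [PySem.List.pyRange_one_eq_nil (by omega),
        PySem.List.pyRange_neg_one_eq_nil (by omega)]
    simp [zipMerge]

-- the merged remainder at distance d is strictly increasing under B's sort key
lemma zipMerge_pairwise (seed n : Int) (d : Int) (hd : 1 ≤ d) :
    (zipMerge (PySem.List.pyRange (seed + d) n 1)
              (PySem.List.pyRange (seed - d) (-1) (-1))).Pairwise
      (fun a b => sweepKeyB seed a < sweepKeyB seed b) := by
  have keyR : ∀ x ∈ PySem.List.pyRange (seed + d) n 1, sweepKeyB seed x = 2 * (x - seed) ∧ d ≤ x - seed := by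
    intro x hx
    have := (PySem.List.mem_pyRange_one).mp hx
    constructor
    · unfold sweepKeyB
      rw [if_neg (by omega), abs_of_nonneg (by omega)]; ring
    · omega
  have keyL : ∀ x ∈ PySem.List.pyRange (seed - d) (-1) (-1), sweepKeyB seed x = 2 * (seed - x) + 1 ∧ d ≤ seed - x := by
    intro x hx
    have := (PySem.List.mem_pyRange_neg_one).mp hx
    constructor
    · unfold sweepKeyB
      rw [if_pos (by omega), abs_of_nonpos (by omega)]; ring
    · omega
  by_cases hr : seed + d < n <;> by_cases hl : 0 ≤ seed - d
  · rw [PySem.List.pyRange_one_cons (a := seed + d) (b := n) hr,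
        PySem.List.pyRange_neg_one_cons (a := seed - d) (b := -1) (by omega)]
    simp only [zipMerge]
    have e1 : seed + d + 1 = seed + (d + 1) := by ring
    have e2 : seed - d - 1 = seed - (d + 1) := by ring
    rw [e1, e2]
    have ih := zipMerge_pairwise seed n (d + 1) (by omega)
    refine List.Pairwise.cons ?_ (List.Pairwise.cons ?_ ih)
    · intro b hb
      rcases List.mem_cons.mp hb with rfl | hb
      · have := (keyL (seed - d) (by rw [PySem.List.mem_pyRange_neg_one]; omega)).1
        have h2 : sweepKeyB seed (seed + d) = 2 * d := by
          have := keyR (seed + d) (by rw [PySem.List.mem_pyRange_one]; omega)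
          omega
        omega
      · rcases mem_zipMerge hb with h | h
        · have := (PySem.List.mem_pyRange_one).mp h
          have h1 : sweepKeyB seed (seed + d) = 2 * d := by
            have := keyR (seed + d) (by rw [PySem.List.mem_pyRange_one]; omega); omega
          have h2 : sweepKeyB seed b = 2 * (b - seed) ∧ d + 1 ≤ b - seed := by
            have hmem : b ∈ PySem.List.pyRange (seed + d) n 1 := by
              rw [PySem.List.mem_pyRange_one]; omega
            exact ⟨(keyR b hmem).1, by omega⟩
          omega
        · have := (PySem.List.mem_pyRange_neg_one).mp h
          have h1 : sweepKeyB seed (seed + d) = 2 * d := by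
            have := keyR (seed + d) (by rw [PySem.List.mem_pyRange_one]; omega); omega
          have h2 : sweepKeyB seed b = 2 * (seed - b) + 1 ∧ d + 1 ≤ seed - b := by
            have hmem : b ∈ PySem.List.pyRange (seed - d) (-1) (-1) := by
              rw [PySem.List.mem_pyRange_neg_one]; omega
            exact ⟨(keyL b hmem).1, by omega⟩
          omega
    · intro b hb
      have h1 : sweepKeyB seed (seed - d) = 2 * d + 1 := by
        have := keyL (seed - d) (by rw [PySem.List.mem_pyRange_neg_one]; omega); omega
      rcases mem_zipMerge hb with h | h
      · have := (PySem.List.mem_pyRange_one).mp h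
        have h2 : sweepKeyB seed b = 2 * (b - seed) ∧ d + 1 ≤ b - seed := by
          have hmem : b ∈ PySem.List.pyRange (seed + d) n 1 := by
            rw [PySem.List.mem_pyRange_one]; omega
          exact ⟨(keyR b hmem).1, by omega⟩
        omega
      · have := (PySem.List.mem_pyRange_neg_one).mp h
        have h2 : sweepKeyB seed b = 2 * (seed - b) + 1 ∧ d + 1 ≤ seed - b := by
          have hmem : b ∈ PySem.List.pyRange (seed - d) (-1) (-1) := by
            rw [PySem.List.mem_pyRange_neg_one]; omega
          exact ⟨(keyL b hmem).1, by omega⟩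
        omega
  · rw [PySem.List.pyRange_one_cons (a := seed + d) (b := n) hr,
        PySem.List.pyRange_neg_one_eq_nil (a := seed - d) (b := -1) (by omega)]
    simp only [zipMerge]
    have e1 : seed + d + 1 = seed + (d + 1) := by ring
    rw [e1, ← PySem.List.pyRange_neg_one_eq_nil (a := seed - (d + 1)) (b := -1) (by omega)]
    have ih := zipMerge_pairwise seed n (d + 1) (by omega)
    refine List.Pairwise.cons ?_ ih
    intro b hb
    have h1 : sweepKeyB seed (seed + d) = 2 * d := by
      have := keyR (seed + d) (by rw [PySem.List.mem_pyRange_one]; omega); omega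
    rcases mem_zipMerge hb with h | h
    · have := (PySem.List.mem_pyRange_one).mp h
      have h2 : sweepKeyB seed b = 2 * (b - seed) ∧ d + 1 ≤ b - seed := by
        have hmem : b ∈ PySem.List.pyRange (seed + d) n 1 := by
          rw [PySem.List.mem_pyRange_one]; omega
        exact ⟨(keyR b hmem).1, by omega⟩
      omega
    · have := (PySem.List.mem_pyRange_neg_one).mp h
      omega
  · rw [PySem.List.pyRange_neg_one_cons (a := seed - d) (b := -1) (by omega),
        PySem.List.pyRange_one_eq_nil (a := seed + d) (b := n) (by omega)]
    simp only [zipMerge]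
    have e2 : seed - d - 1 = seed - (d + 1) := by ring
    rw [e2, ← PySem.List.pyRange_one_eq_nil (a := seed + (d + 1)) (b := n) (by omega)]
    have ih := zipMerge_pairwise seed n (d + 1) (by omega)
    refine List.Pairwise.cons ?_ ih
    intro b hb
    have h1 : sweepKeyB seed (seed - d) = 2 * d + 1 := by
      have := keyL (seed - d) (by rw [PySem.List.mem_pyRange_neg_one]; omega); omega
    rcases mem_zipMerge hb with h | h
    · have := (PySem.List.mem_pyRange_one).mp h
      omega
    · have := (PySem.List.mem_pyRange_neg_one).mp h
      have h2 : sweepKeyB seed b = 2 * (seed - b) + 1 ∧ d + 1 ≤ seed - b := by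
        have hmem : b ∈ PySem.List.pyRange (seed - d) (-1) (-1) := by
          rw [PySem.List.mem_pyRange_neg_one]; omega
        exact ⟨(keyL b hmem).1, by omega⟩
      omega
  · rw [PySem.List.pyRange_one_eq_nil (by omega), PySem.List.pyRange_neg_one_eq_nil (by omega)]
    simp [zipMerge]
termination_by (max seed (n - seed - 1) + 1 - d).toNat
decreasing_by all_goals omega

-- B's sort names the merged order A produces
lemma sorted_eq_zipMerge (seed n : Int) :
    PySem.List.sorted (PySem.List.pyRange 0 seed 1 ++ PySem.List.pyRange (seed + 1) n 1)
      (sweepKeyB seed) false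
      = zipMerge (PySem.List.pyRange (seed + 1) n 1) (PySem.List.pyRange (seed - 1) (-1) (-1)) := by
  apply PySem.List.sorted_eq_of_perm_of_pairwise_lt
  · have h1 := zipMerge_perm (PySem.List.pyRange (seed + 1) n 1) (PySem.List.pyRange (seed - 1) (-1) (-1))
    have h2 : PySem.List.pyRange (seed - 1) (-1) (-1) = (PySem.List.pyRange 0 seed 1).reverse := by
      have := PySem.List.pyRange_neg_one_eq_reverse (a := seed - 1) (b := -1)
      simpa using this
    refine h1.trans ?_
    rw [h2]
    exact (List.perm_append_comm).trans
      (List.Perm.append ((PySem.List.pyRange 0 seed 1).reverse_perm) (List.Perm.refl _))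
  · exact zipMerge_pairwise seed n 1 (by omega)

-- ===== VERDICT (by name: the statement is the Claim_ definition above) =====
theorem sweep_order_from_seed_py_spec : Claim_equal_sweep_order_from_seed_py := by
  intro seed n _
  show _ = _
  rw [sweep_order_from_seed_py, sweepLoopA_eq_merge]
  rw [sweep_order_from_seed_py_alt, sorted_eq_zipMerge]
  simp
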